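-- pv_equiv track=rewrite | github.com/IvanovskyOrtega/project-euler-solutions | solutions/011_largest_product_in_a_grid.py | find_greatest_product_in_rows
-- ===== SOURCE A (Python) =====
-- from typing import List
--
-- def find_greatest_product_in_rows(grid: List[List[int]], n: int) -> int:
--     """find_greatest_product_in_rows.
--
--     Find the greatest product of `n` consecutive numbers in the rows of a given
--     grid.
--
--     Arguments
--     ----------
--     grid : List[List[int]]
--         The grid of numbers.
--     n : int
--         The amount of consecutive numbers to find its product.
--
--     Returns
--     -------
--     int : The maximum product for the grid rows.
--
--     Examples
--     --------
--     >>> find_greatest_product_in_rows([[1,2], [2,3]],2,)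
--     6
--     """
--     grid_size = len(grid)
--     if n > grid_size:
--         return -1
--     max_prod = 0
--     i = 0
--     while i < grid_size:
--         j = n - 1
--         numbers = grid[i][0:n]
--         while True:
--             current_prod = 1
--             for num in numbers:
--                 if num == 0:
--                     current_prod = 0
--                     break
--                 current_prod *= num
--             max_prod = max(max_prod, current_prod)
--             j += 1
--             if j >= grid_size:
--                 break
--             numbers.pop(0)
--             numbers.append(grid[i][j])
--         i += 1
--     return max_prod
-- ===== SOURCE B (Python) =====
-- def find_greatest_product_in_rows(grid, n):
--     if n > len(grid):
--         return -1
--     best = 0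
--     for row in grid:
--         prod = 1   # product of the nonzero entries of the current window
--         zeros = 0  # number of zeros in the current window
--         for k, x in enumerate(row):
--             if x == 0:
--                 zeros += 1
--             else:
--                 prod *= x
--             if k >= n:
--                 y = row[k - n]
--                 if y == 0:
--                     zeros -= 1
--                 else:
--                     prod //= y
--             if k >= n - 1:
--                 best = max(best, 0 if zeros else prod)
--     return best
-- ===== Notes on version B (the rewrite author's own statement) =====
-- stated objective: alternative
-- what changed: A recomputes the product of each window from scratch (pop/append list plus an inner product loop per window, column bound taken from the row count); B makes one sliding-window pass over each full row, maintaining a running product of the nonzero entries and a zero count and dividing out the element that leaves the window; …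
-- outside the precondition, e.g. on find_greatest_product_in_rows([[5], [1, 2]], 2): A returns 5, B returns 2; on find_greatest_product_in_rows([[1, 2, 9]], 1): A returns 1, B returns 9; on find_greatest_product_in_rows([[1, 2], [3, 4]], -1): A returns 4, B raises IndexError
import Mathlib
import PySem

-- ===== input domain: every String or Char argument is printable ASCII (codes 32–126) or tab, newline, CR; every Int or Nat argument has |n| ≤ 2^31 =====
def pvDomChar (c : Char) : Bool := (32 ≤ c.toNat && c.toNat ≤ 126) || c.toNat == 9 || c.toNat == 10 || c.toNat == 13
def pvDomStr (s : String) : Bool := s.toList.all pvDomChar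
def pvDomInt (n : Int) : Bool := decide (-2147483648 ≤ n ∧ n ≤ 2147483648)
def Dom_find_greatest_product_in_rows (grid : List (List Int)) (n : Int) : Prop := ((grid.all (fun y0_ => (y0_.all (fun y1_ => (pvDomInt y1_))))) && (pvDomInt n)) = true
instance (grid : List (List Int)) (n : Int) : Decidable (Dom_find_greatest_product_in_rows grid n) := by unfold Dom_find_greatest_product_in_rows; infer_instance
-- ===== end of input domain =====

-- B replaces A's per-window recomputation (pop/append list + product loop per window) by a single
-- sliding-window pass over each full row keeping a running product of the nonzero entries and a
-- zero count (alternative algorithm); equivalence is claimed on square grids with n ≥ 1 (see Pre_).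


-- ===== PORT A =====
-- the `for num in numbers` product loop with its `break` on a zero entry
def pvAProd : Int → List Int → Int
  | acc, [] => acc
  | acc, num :: rest => if num = 0 then 0 else pvAProd (acc * num) rest

-- the inner `while True` loop; `fuel` only bounds the iteration count (grid_size iterations suffice
-- under Pre_); `numbers.tail` is Python's `numbers.pop(0)` (exact: numbers is nonempty under Pre_),
-- `.getD 0` is a stand-in for the IndexError case, never reached under Pre_
def pvAInner (row : List Int) (gs : Int) : Nat → List Int → Int → Int → Int
  | fuel, numbers, j, max_prod =>
    let m := max max_prod (pvAProd 1 numbers)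
    let j' := j + 1
    if j' ≥ gs then m
    else
      match fuel with
      | 0 => m
      | fuel + 1 => pvAInner row gs fuel (numbers.tail ++ [(PySem.List.pyGet? row j').getD 0]) j' m

-- the outer `while i < grid_size` loop
def pvAOuter (grid : List (List Int)) (gs n : Int) : Nat → Int → Int → Int
  | 0, _, max_prod => max_prod
  | fuel + 1, i, max_prod =>
    if i < gs then
      let row := (PySem.List.pyGet? grid i).getD []
      pvAOuter grid gs n fuel (i + 1)
        (pvAInner row gs gs.toNat (PySem.List.slice row (some 0) (some n)) (n - 1) max_prod)
    else max_prod

def find_greatest_product_in_rows (grid : List (List Int)) (n : Int) : Int :=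
  let gs : Int := grid.length
  if n > gs then -1 else pvAOuter grid gs n (grid.length + 1) 0 0

-- ===== PORT B =====
-- one iteration of B's `for k, x in enumerate(row)` loop; state = (prod, zeros, best)
def pvBStep (row : List Int) (n : Int) (st : Int × Int × Int) (kx : Int × Int) : Int × Int × Int :=
  let k := kx.1
  let x := kx.2
  let prod := st.1
  let zeros := st.2.1
  let best := st.2.2
  let pz := if x = 0 then (prod, zeros + 1) else (prod * x, zeros)
  let pz :=
    if k ≥ n then
      let y := (PySem.List.pyGet? row (k - n)).getD 0
      if y = 0 then (pz.1, pz.2 - 1) else (PySem.Int.floordiv pz.1 y, pz.2)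
    else pz
  let best := if k ≥ n - 1 then max best (if pz.2 ≠ 0 then 0 else pz.1) else best
  (pz.1, pz.2, best)

-- B's body of `for row in grid`
def pvBRow (n : Int) (best : Int) (row : List Int) : Int :=
  ((PySem.List.enumerate row 0).foldl (pvBStep row n) (1, 0, best)).2.2

def find_greatest_product_in_rows_alt (grid : List (List Int)) (n : Int) : Int :=
  if n > (grid.length : Int) then -1 else grid.foldl (pvBRow n) 0

-- ===== PRECONDITION & SPEC =====
-- Pre_ restricts to the natural domain of the function: square grids with n ≥ 1 (plus the trivial
-- n > len(grid) and empty-grid cases, where A returns its documented -1 / 0). Outside it A raises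
-- (n = 0 pops from an empty list; short rows hit IndexError) or its returned values hinge on the
-- accidental use of len(grid) as the column bound and on negative-index wraparound for n < 0.
def Pre_find_greatest_product_in_rows (grid : List (List Int)) (n : Int) : Prop :=
  grid = [] ∨ (grid.length : Int) < n ∨ (1 ≤ n ∧ ∀ row ∈ grid, row.length = grid.length)
instance (grid : List (List Int)) (n : Int) : Decidable (Pre_find_greatest_product_in_rows grid n) := by
  unfold Pre_find_greatest_product_in_rows; infer_instance

def pvWitness_find_greatest_product_in_rows : List (List Int) × Int := ([[1, 2], [3, 4]], 2)

def Spec_find_greatest_product_in_rows (grid : List (List Int)) (n : Int) (out : Int) : Prop := out = find_greatest_product_in_rows_alt grid n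
instance (grid : List (List Int)) (n : Int) (out : Int) : Decidable (Spec_find_greatest_product_in_rows grid n out) := by unfold Spec_find_greatest_product_in_rows; infer_instance

-- ===== CLAIM (what is proved, stated in full; the proofs are below) =====
def Claim_equal_find_greatest_product_in_rows : Prop := ∀ (grid : List (List Int)) (n : Int), Dom_find_greatest_product_in_rows grid n → Pre_find_greatest_product_in_rows grid n → Spec_find_greatest_product_in_rows grid n (find_greatest_product_in_rows grid n)


-- ===== LEMMAS AND PROOFS =====

-- product of the window r[k : k+N]
def pvWProd (r : List Int) (N k : Nat) : Int := ((r.drop k).take N).prod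

-- fold of `max` over the window products at positions k, k+1, …, k+c-1
def pvWinMax (r : List Int) (N : Nat) : Nat → Nat → Int → Int
  | _, 0, m => m
  | k, c + 1, m => pvWinMax r N (k + 1) c (max m (pvWProd r N k))

-- product of the nonzero entries
def pvProdNZ (l : List Int) : Int := (l.filter (fun x => x ≠ 0)).prod

lemma pvAProd_eq (xs : List Int) : ∀ acc, pvAProd acc xs = acc * xs.prod := by
  induction xs with
  | nil => intro acc; simp [pvAProd]
  | cons x xs ih =>
    intro acc
    by_cases hx : x = 0
    · simp [pvAProd, hx]
    · simp [pvAProd, hx, ih]; ring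

lemma pvProd_char (l : List Int) : (if l.count 0 = 0 then pvProdNZ l else 0) = l.prod := by
  induction l with
  | nil => simp [pvProdNZ]
  | cons x xs ih =>
    by_cases hx : x = 0
    · simp [hx]
    · have hc : (x :: xs).count 0 = xs.count 0 := by
        simp [hx]
      have hp : pvProdNZ (x :: xs) = x * pvProdNZ xs := by
        simp [pvProdNZ, hx]
      rw [hc, hp, List.prod_cons]
      split_ifs with h
      · rw [← ih, if_pos h]
      · rw [← ih, if_neg h]; ring

lemma pvWinMax_succ_right (r : List Int) (N : Nat) :
    ∀ c k m, pvWinMax r N k (c + 1) m = max (pvWinMax r N k c m) (pvWProd r N (k + c)) := by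
  intro c
  induction c with
  | zero => intro k m; simp [pvWinMax]
  | succ c ih =>
    intro k m
    have h1 : pvWinMax r N k (c + 1 + 1) m
        = pvWinMax r N (k + 1) (c + 1) (max m (pvWProd r N k)) := rfl
    have h2 : pvWinMax r N k (c + 1) m
        = pvWinMax r N (k + 1) c (max m (pvWProd r N k)) := rfl
    have h3 : k + 1 + c = k + (c + 1) := by omega
    rw [h1, ih, h2, h3]

lemma pvWindowShift (row : List Int) (N k : Nat) (hN : 1 ≤ N) (h : k + N < row.length)
    (x : Int) (hx : row[k + N]? = some x) :
    ((row.drop k).take N).tail ++ [x] = (row.drop (k + 1)).take N := by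
  obtain ⟨N', rfl⟩ : ∃ N', N = N' + 1 := ⟨N - 1, by omega⟩
  have hk : k < row.length := by omega
  rw [List.drop_eq_getElem_cons hk, List.take_succ_cons, List.tail_cons, List.take_add_one]
  have : (row.drop (k + 1))[N']? = some x := by
    rw [List.getElem?_drop]
    rw [← hx]; congr 1; omega
  rw [this]
  rfl

lemma pvInnerA (row : List Int) (G N : Nat) (hN : 1 ≤ N) (hNG : N ≤ G) (hlen : G ≤ row.length) :
    ∀ c k fuel m, k + c = G - N + 1 → 1 ≤ c → c ≤ fuel + 1 →
      pvAInner row (G : Int) fuel ((row.drop k).take N) (((k + N : Nat) : Int) - 1) m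
        = pvWinMax row N k c m := by
  intro c
  induction c with
  | zero => intro k fuel m _ hc _; omega
  | succ c ih =>
    intro k fuel m hk hc hf
    have hW : pvAProd 1 ((row.drop k).take N) = pvWProd row N k := by
      rw [pvAProd_eq]; simp [pvWProd]
    have hj : (((k + N : Nat) : Int)) - 1 + 1 = ((k + N : Nat) : Int) := by ring
    rcases Nat.eq_zero_or_pos c with hc0 | hc1
    · subst hc0
      have hkG : k + N = G := by omega
      unfold pvAInner; simp only [hj, hW]
      rw [if_pos (by push_cast; omega)]
      rfl
    · have hkN : k + N < G := by omega
      obtain ⟨f, rfl⟩ : ∃ f, fuel = f + 1 := ⟨fuel - 1, by omega⟩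
      have hx : row[k + N]? = some (row[k + N]'(by omega)) := List.getElem?_eq_getElem (by omega)
      have hget : (PySem.List.pyGet? row ((k + N : Nat) : Int)).getD 0 = row[k + N]'(by omega) := by
        rw [PySem.List.pyGet?_natCast, hx]; rfl
      unfold pvAInner; simp only [hj, hW]
      rw [if_neg (by push_cast; omega)]
      show pvAInner row (G : Int) f
          (((row.drop k).take N).tail ++ [(PySem.List.pyGet? row (((k + N : Nat) : Int))).getD 0])
          ((k + N : Nat) : Int) (max m (pvWProd row N k)) = _
      rw [hget, pvWindowShift row N k hN (by omega) _ hx]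
      have hj2 : ((k + N : Nat) : Int) = (((k + 1) + N : Nat) : Int) - 1 := by push_cast; ring
      rw [hj2, ih (k + 1) f (max m (pvWProd row N k)) (by omega) (by omega) (by omega)]
      rfl

lemma pvPairAdd (W : List Int) (x : Int) :
    (if x = 0 then (pvProdNZ W, ((W.count 0 : Nat) : Int) + 1)
     else (pvProdNZ W * x, ((W.count 0 : Nat) : Int)))
      = (pvProdNZ (W ++ [x]), (((W ++ [x]).count 0 : Nat) : Int)) := by
  by_cases hx : x = 0 <;>
    simp [pvProdNZ, List.filter_append, List.count_append, hx]

lemma pvPairRem (T : List Int) (y : Int) :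
    (if y = 0 then (pvProdNZ (y :: T), (((y :: T).count 0 : Nat) : Int) - 1)
     else (PySem.Int.floordiv (pvProdNZ (y :: T)) y, (((y :: T).count 0 : Nat) : Int)))
      = (pvProdNZ T, ((T.count 0 : Nat) : Int)) := by
  by_cases hy : y = 0
  · simp [pvProdNZ, hy]
  · have h1 : pvProdNZ (y :: T) = y * pvProdNZ T := by
      simp [pvProdNZ, hy]
    have h2 : PySem.Int.floordiv (y * pvProdNZ T) y = pvProdNZ T :=
      Int.mul_fdiv_cancel_left _ hy
    simp [hy, h1, h2]

lemma pvValEq (W : List Int) :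
    (if (((W.count 0 : Nat) : Int)) ≠ 0 then (0 : Int) else pvProdNZ W) = W.prod := by
  rw [← pvProd_char W]
  by_cases h : W.count 0 = 0 <;> simp [h]

lemma pvWinAdd (r : List Int) (k p : Nat) (hk : k < r.length) (hp : p ≤ k) :
    (r.take (k + 1)).drop p = (r.take k).drop p ++ [r[k]] := by
  rw [List.take_add_one, List.getElem?_eq_getElem hk]
  rw [List.drop_append_of_le_length (by simp; omega)]
  rfl

lemma pvWinRem (r : List Int) (k N : Nat) (hk : k < r.length) (hN : N ≤ k) :
    (r.take (k + 1)).drop (k - N) = r[k - N]'(by omega) :: (r.take (k + 1)).drop (k + 1 - N) := by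
  have hlt : k - N < (r.take (k + 1)).length := by simp; omega
  rw [List.drop_eq_getElem_cons hlt]
  congr 1
  · exact List.getElem_take
  · congr 1; omega

lemma pvWinWProd (r : List Int) (k N : Nat) (hNk : N ≤ k + 1) :
    ((r.take (k + 1)).drop (k + 1 - N)).prod = pvWProd r N (k + 1 - N) := by
  unfold pvWProd
  rw [List.drop_take, Nat.sub_sub_self hNk]

-- the enumerate list over a prefix grows by one indexed element
lemma pvEnumTake (r : List Int) (k : Nat) (hk : k < r.length) :
    PySem.List.enumerate (r.take (k + 1)) 0
      = PySem.List.enumerate (r.take k) 0 ++ [((k : Int), r[k])] := by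
  rw [List.take_add_one, List.getElem?_eq_getElem hk, PySem.List.enumerate_append]
  congr 1
  have hlen : (r.take k).length = k := by simp; omega
  simp [PySem.List.enumerate_cons, PySem.List.enumerate_nil, hlen]

lemma pvInnerB (r : List Int) (N : Nat) (hN : 1 ≤ N) (b0 : Int) :
    ∀ k : Nat, k ≤ r.length →
      (PySem.List.enumerate (r.take k) 0).foldl (pvBStep r (N : Int)) (1, 0, b0)
        = (pvProdNZ ((r.take k).drop (k - N)), ((((r.take k).drop (k - N)).count 0 : Nat) : Int),
           pvWinMax r N 0 (k + 1 - N) b0) := by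
  intro k
  induction k with
  | zero =>
    intro _
    have h0 : 0 + 1 - N = 0 := by omega
    simp [PySem.List.enumerate_nil, pvProdNZ, h0, pvWinMax]
  | succ k ih =>
    intro hk1
    have hk : k < r.length := by omega
    rw [pvEnumTake r k hk, List.foldl_append, List.foldl_cons, List.foldl_nil, ih (by omega)]
    set W := (r.take k).drop (k - N) with hW
    set W' := (r.take (k + 1)).drop (k + 1 - N) with hW'
    have hWx : (r.take (k + 1)).drop (k - N) = W ++ [r[k]] :=
      pvWinAdd r k (k - N) hk (by omega)
    unfold pvBStep
    simp only
    rw [pvPairAdd W r[k]]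
    by_cases hkN : N ≤ k
    · -- removal step: the window loses its first element r[k-N]
      have hyi : ((k : Int) - (N : Int)) = ((k - N : Nat) : Int) := by push_cast; omega
      have hy : (PySem.List.pyGet? r ((k : Int) - (N : Int))).getD 0 = r[k - N]'(by omega) := by
        rw [hyi, PySem.List.pyGet?_natCast, List.getElem?_eq_getElem (by omega)]; rfl
      have hcons : W ++ [r[k]] = r[k - N]'(by omega) :: W' := by
        rw [← hWx, pvWinRem r k N hk hkN]
      rw [if_pos (by exact_mod_cast Nat.cast_le.mpr hkN), hy, hcons, pvPairRem]
      rw [if_pos (by push_cast; omega)]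
      have hbest : (if ((W'.count 0 : Nat) : Int) ≠ 0 then (0:Int) else pvProdNZ W')
          = pvWProd r N (k + 1 - N) := by
        rw [pvValEq W', hW', pvWinWProd r k N (by omega)]
      rw [hbest]
      have hwm : pvWinMax r N 0 (k + 1 + 1 - N) b0
          = max (pvWinMax r N 0 (k + 1 - N) b0) (pvWProd r N (k + 1 - N)) := by
        have h4 : k + 1 + 1 - N = (k + 1 - N) + 1 := by omega
        rw [h4, pvWinMax_succ_right]
        congr 2; omega
      rw [hwm]
    · -- no removal: the window only grows
      have hWeq : W' = W ++ [r[k]] := by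
        rw [hW', hW]
        have h1 : k + 1 - N = k - N := by omega
        rw [h1, hWx]
      rw [if_neg (by push_cast; omega)]
      by_cases hkN1 : N ≤ k + 1
      · -- k + 1 = N: the first full window is complete
        rw [if_pos (by push_cast; omega)]
        have hbest : (if (((W ++ [r[k]]).count 0 : Nat) : Int) ≠ 0 then (0:Int)
            else pvProdNZ (W ++ [r[k]])) = pvWProd r N (k + 1 - N) := by
          rw [pvValEq, ← hWeq, hW', pvWinWProd r k N hkN1]
        rw [hbest]
        have hwm : pvWinMax r N 0 (k + 1 + 1 - N) b0
            = max (pvWinMax r N 0 (k + 1 - N) b0) (pvWProd r N (k + 1 - N)) := by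
          have h4 : k + 1 + 1 - N = (k + 1 - N) + 1 := by omega
          rw [h4, pvWinMax_succ_right]
          congr 2; omega
        rw [hwm, hWeq]
      · rw [if_neg (by push_cast; omega)]
        have h2 : k + 1 + 1 - N = k + 1 - N := by omega
        rw [h2, hWeq]

lemma pvRowB (row : List Int) (G N : Nat) (hN : 1 ≤ N) (hNG : N ≤ G) (hlen : row.length = G)
    (b0 : Int) : pvBRow (N : Int) b0 row = pvWinMax row N 0 (G - N + 1) b0 := by
  unfold pvBRow
  have h := pvInnerB row N hN b0 row.length (le_refl _)
  rw [List.take_length] at h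
  rw [h]
  have h1 : row.length + 1 - N = G - N + 1 := by omega
  rw [h1]

lemma pvOuterA (grid : List (List Int)) (N : Nat) (hN : 1 ≤ N) (hNG : N ≤ grid.length)
    (hrows : ∀ row ∈ grid, grid.length ≤ row.length) :
    ∀ fuel (k : Nat) m, grid.length - k < fuel →
      pvAOuter grid (grid.length : Int) (N : Int) fuel (k : Int) m
        = (grid.drop k).foldl
            (fun m row => pvWinMax row N 0 (grid.length - N + 1) m) m := by
  intro fuel
  induction fuel with
  | zero => intro k m h; omega
  | succ fuel ih =>
    intro k m h
    unfold pvAOuter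
    by_cases hkG : k < grid.length
    · rw [if_pos (by exact_mod_cast Nat.cast_lt.mpr hkG)]
      have hrow : (PySem.List.pyGet? grid (k : Int)).getD [] = grid[k] := by
        rw [PySem.List.pyGet?_natCast, List.getElem?_eq_getElem hkG]; rfl
      have hsl : PySem.List.slice grid[k] (some 0) (some (N : Int)) = (grid[k].drop 0).take N := by
        simp only [PySem.List.slice_zero_start]
        rw [PySem.List.slice_to _ (by positivity)]
        norm_num
      have hfuel : ((grid.length : Int)).toNat = grid.length := by simp
      have hj0 : (N : Int) - 1 = (((0 + N : Nat) : Int)) - 1 := by norm_num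
      rw [hrow]
      show pvAOuter grid (grid.length : Int) (N : Int) fuel ((k : Int) + 1)
          (pvAInner (grid[k]'hkG) (grid.length : Int) ((grid.length : Int)).toNat
            (PySem.List.slice (grid[k]'hkG) (some 0) (some (N : Int))) ((N : Int) - 1) m) = _
      rw [hsl, hfuel, hj0,
          pvInnerA grid[k] grid.length N hN hNG (hrows _ (List.getElem_mem hkG)) (grid.length - N + 1)
            0 grid.length m (by omega) (by omega) (by omega)]
      have hk1 : ((k : Int)) + 1 = ((k + 1 : Nat) : Int) := by push_cast; ring
      rw [hk1, ih (k + 1) _ (by omega)]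
      rw [List.drop_eq_getElem_cons hkG, List.foldl_cons]
    · rw [if_neg (by exact_mod_cast fun hc => hkG (by exact_mod_cast Nat.cast_lt.mp hc))]
      rw [List.drop_eq_nil_of_le (by omega), List.foldl_nil]

-- ===== VERDICT (by name: the statement is the Claim_ definition above) =====
theorem find_greatest_product_in_rows_spec : Claim_equal_find_greatest_product_in_rows := by
  intro grid n hDom hPre
  unfold Spec_find_greatest_product_in_rows
  unfold find_greatest_product_in_rows find_greatest_product_in_rows_alt
  by_cases hgt : n > (grid.length : Int)
  · simp only [if_pos hgt]
  · simp only [if_neg hgt]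
    rcases hPre with rfl | hlt | ⟨hn1, hsq⟩
    · simp [pvAOuter]
    · exact absurd hlt (by omega)
    · obtain ⟨N, rfl⟩ : ∃ N : Nat, n = (N : Int) := ⟨n.toNat, by omega⟩
      have hN : 1 ≤ N := by exact_mod_cast hn1
      have hNG : N ≤ grid.length := by exact_mod_cast not_lt.mp hgt
      have hrows : ∀ row ∈ grid, grid.length ≤ row.length :=
        fun row hrow => le_of_eq (hsq row hrow).symm
      have h0 : (0 : Int) = ((0 : Nat) : Int) := by norm_num
      nth_rewrite 1 [h0]
      rw [pvOuterA grid N hN hNG hrows (grid.length + 1) 0 0 (by omega), List.drop_zero]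
      exact PySem.List.foldl_congr_mem grid _ _ 0
        (fun m row hrow => (pvRowB row grid.length N hN hNG (hsq row hrow) m).symm)
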